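-- pv_equiv track=rewrite | github.com/sandersyen/CS-839-Data-Science-Project | Stage 1/code/featureIdentifier.py | contains_country
-- ===== SOURCE A (Python) =====
-- def contains_country(ngram, country_set):
--     """
--     Identify if a n-gram has countries, return 1 (has feature) 0 (no such feature)
--     :param ngram: a ngram
--     :param country_set: a set contains all countries
--     :return: 1 (has feature) or 0 (no such feature)
--     """
--     # find if any word in current ngram has country name
--     words = ngram[0].split(' ')
--     for word in words:
--         if word.lower() in country_set:
--             return 1
--     if len(words) >= 2:
--         for i in range(1, len(words)):
--             if (words[i-1]+' '+words[i]).lower() in country_set: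
--                 return 1
--     if len(words) >= 3:
--         for i in range(2, len(words)):
--             if (words[i-2]+' '+words[i-1]+' '+words[i]).lower() in country_set:
--                 return 1
--     return 0
-- ===== SOURCE B (Python) =====
-- def contains_country(ngram, country_set):
--     """Country-driven matching: lowercase the words once, then for each country
--     match its own space-split word sequence (length <= 3) as a contiguous run
--     in the lowered word list, instead of generating every uni/bi/trigram."""
--     low = [w.lower() for w in ngram[0].split(' ')]
--     n = len(low)
--     for country in country_set:
--         parts = country.split(' ')
--         k = len(parts)
--         if k <= 3 and any(low[i:i+k] == parts for i in range(n - k + 1)):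
--             return 1
--     return 0
-- ===== Notes on version B (the rewrite author's own statement) =====
-- stated objective: alternative
-- what changed: Instead of generating every lowercased uni/bi/trigram of the ngram and testing membership, B lowercases the words once and, driven by the country list, matches each country's own space-split word sequence (length <= 3) as a contiguous run in the lowered word list.
import Mathlib
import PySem

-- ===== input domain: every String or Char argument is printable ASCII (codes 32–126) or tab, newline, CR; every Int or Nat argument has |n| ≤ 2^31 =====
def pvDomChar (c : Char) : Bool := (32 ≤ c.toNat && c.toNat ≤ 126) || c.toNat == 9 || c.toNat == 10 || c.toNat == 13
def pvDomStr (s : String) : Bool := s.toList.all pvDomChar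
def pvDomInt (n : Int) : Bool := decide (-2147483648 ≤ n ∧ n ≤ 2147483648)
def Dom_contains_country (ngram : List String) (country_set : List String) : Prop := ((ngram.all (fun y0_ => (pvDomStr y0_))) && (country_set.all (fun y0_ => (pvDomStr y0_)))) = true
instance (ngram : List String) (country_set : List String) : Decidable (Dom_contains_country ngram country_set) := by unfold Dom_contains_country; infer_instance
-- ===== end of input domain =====

-- ===== PORT A =====
-- B replaces A's gram-generation scans (all lowercased uni/bi/trigrams tested for membership)
-- by a country-driven algorithm: lowercase the words once, then match each country's own
-- space-split word sequence as a contiguous run in the lowered word list (alternative; same cost).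
def contains_country (ngram : List String) (country_set : List String) : Int :=
  let words := (PySem.Str.split? ((PySem.List.pyGet? ngram 0).getD "") " ").getD []
  if words.any (fun word => decide (PySem.Str.lower word ∈ country_set)) then 1
  else if 2 ≤ words.length ∧
      (PySem.List.pyRange 1 (words.length : Int)).any (fun i =>
        decide (PySem.Str.lower (PySem.List.pyGetD words (i-1) "" ++ " " ++ PySem.List.pyGetD words i "") ∈ country_set)) = true then 1
  else if 3 ≤ words.length ∧
      (PySem.List.pyRange 2 (words.length : Int)).any (fun i =>
        decide (PySem.Str.lower (PySem.List.pyGetD words (i-2) "" ++ " " ++ PySem.List.pyGetD words (i-1) "" ++ " " ++ PySem.List.pyGetD words i "") ∈ country_set)) = true then 1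
  else 0

-- ===== PORT B =====
-- the 'for country in country_set: … return 1 / fall through' loop of Source B
def ccAltLoop (low : List String) (n : Nat) : List String → Int
  | [] => 0
  | country :: rest =>
      let parts := (PySem.Str.split? country " ").getD []
      let k := parts.length
      if k ≤ 3 ∧ (PySem.List.pyRange 0 ((n : Int) - (k : Int) + 1)).any
          (fun i => PySem.List.slice low (some i) (some (i + (k : Int))) == parts) = true
      then 1 else ccAltLoop low n rest

def contains_country_alt (ngram : List String) (country_set : List String) : Int :=
  let low := ((PySem.Str.split? ((PySem.List.pyGet? ngram 0).getD "") " ").getD []).map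
      (fun w => PySem.Str.lower w)
  let n := low.length
  ccAltLoop low n country_set

-- ===== PRECONDITION & SPEC =====
-- Pre_ excludes only the empty ngram list, on which A raises IndexError at ngram[0] (B raises there too).
def Pre_contains_country (ngram : List String) (country_set : List String) : Prop := ngram ≠ []
instance (ngram : List String) (country_set : List String) : Decidable (Pre_contains_country ngram country_set) := by unfold Pre_contains_country; infer_instance
def pvWitness_contains_country : List String × List String := (["New York city"], ["new york"])
def Spec_contains_country (ngram : List String) (country_set : List String) (out : Int) : Prop := out = contains_country_alt ngram country_set
instance (ngram : List String) (country_set : List String) (out : Int) : Decidable (Spec_contains_country ngram country_set out) := by unfold Spec_contains_country; infer_instance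

-- ===== CLAIM (what is proved, stated in full; the proofs are below) =====
def Claim_equal_contains_country : Prop := ∀ (ngram : List String) (country_set : List String), Dom_contains_country ngram country_set → Pre_contains_country ngram country_set → Spec_contains_country ngram country_set (contains_country ngram country_set)

-- ===== LEMMAS AND PROOFS =====

def sp : List Char → List (List Char)
  | [] => [[]]
  | c :: r => if c = ' ' then [] :: sp r else
      match sp r with
      | [] => [[c]]
      | p :: ps => (c :: p) :: ps

theorem sp_ne_nil (l : List Char) : sp l ≠ [] := by
  cases l with
  | nil => simp [sp]
  | cons c r =>
    simp only [sp]
    split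
    · simp
    · split <;> simp

theorem go_eq (fuel : Nat) : ∀ (l cur : List Char) (acc : List (List Char)), l.length < fuel →
    PySem.Chars.splitOn.go [' '] fuel l cur acc = acc.reverse ++ (sp l).modifyHead (cur.reverse ++ ·) := by
  induction fuel with
  | zero => intro l cur acc h; omega
  | succ f ih =>
    intro l cur acc h
    cases l with
    | nil => simp [PySem.Chars.splitOn.go, sp]
    | cons c rest =>
      by_cases hc : c = ' '
      · subst hc
        simp only [PySem.Chars.splitOn.go, List.isPrefixOf, BEq.rfl, Bool.true_and, if_true,
          List.length_singleton, List.drop_one, List.tail_cons]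
        rw [ih rest [] (cur.reverse :: acc) (by simp at h ⊢; omega)]
        simp only [sp, if_true, List.reverse_cons, List.reverse_nil, List.nil_append,
          List.modifyHead_cons, List.append_nil, List.append_assoc, List.cons_append]
        cases sp rest <;> simp
      · have hpre : [' '].isPrefixOf (c :: rest) = false := by
          simp [List.isPrefixOf]
          intro h'; exact hc h'.symm
        simp only [PySem.Chars.splitOn.go, hpre, Bool.false_eq_true, if_false]
        rw [ih rest (c :: cur) acc (by simp at h ⊢; omega)]
        simp only [sp, hc, if_false]
        rcases hsp : sp rest with _ | ⟨p, ps⟩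
        · exact absurd hsp (sp_ne_nil rest)
        · simp

theorem splitOn_space (s : List Char) : PySem.Chars.splitOn s [' '] = sp s := by
  show PySem.Chars.splitOn.go [' '] (s.length + 1) s [] [] = sp s
  rw [go_eq (s.length + 1) s [] [] (by omega)]
  cases sp s <;> simp

theorem sp_no_space (l : List Char) : ∀ p ∈ sp l, ' ' ∉ p := by
  induction l with
  | nil => intro p hp; simp [sp] at hp; simp [hp]
  | cons c r ih =>
    intro p hp
    by_cases hc : c = ' '
    · subst hc; simp only [sp, if_true] at hp
      rcases List.mem_cons.1 hp with rfl | hp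
      · simp
      · exact ih p hp
    · obtain ⟨q, qs, hsp⟩ := List.exists_cons_of_ne_nil (sp_ne_nil r)
      simp only [sp, hc, if_false, hsp] at hp
      rcases List.mem_cons.1 hp with rfl | hp
      · intro hmem
        rcases List.mem_cons.1 hmem with h1 | h1
        · exact hc h1.symm
        · exact ih q (by rw [hsp]; simp) h1
      · exact ih p (by rw [hsp]; exact List.mem_cons_of_mem _ hp)

theorem join_sp (l : List Char) : [' '].intercalate (sp l) = l := by
  induction l with
  | nil => simp [sp, List.intercalate]
  | cons c r ih =>
    by_cases hc : c = ' '
    · subst hc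
      obtain ⟨q, qs, hsp⟩ := List.exists_cons_of_ne_nil (sp_ne_nil r)
      rw [hsp] at ih
      simp only [sp, if_true, hsp]
      simp [List.intercalate, List.intersperse] at ih ⊢
      simpa using ih
    · obtain ⟨q, qs, hsp⟩ := List.exists_cons_of_ne_nil (sp_ne_nil r)
      rw [hsp] at ih
      simp only [sp, hc, if_false, hsp]
      cases qs with
      | nil => simpa [List.intercalate] using ih
      | cons q2 qs2 =>
        simp [List.intercalate, List.intersperse] at ih ⊢
        simpa using ih

theorem sp_of_no_space (l : List Char) (h : ' ' ∉ l) : sp l = [l] := by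
  induction l with
  | nil => simp [sp]
  | cons c r ih =>
    have hc : c ≠ ' ' := fun hc => h (by simp [hc])
    have hr : ' ' ∉ r := fun hr => h (by simp [hr])
    simp only [sp, hc, if_false, ih hr]

theorem sp_append (p t : List Char) (h : ' ' ∉ p) : sp (p ++ ' ' :: t) = p :: sp t := by
  induction p with
  | nil => simp [sp]
  | cons c q ih =>
    have hc : c ≠ ' ' := fun hc => h (by simp [hc])
    have hq : ' ' ∉ q := fun hr => h (by simp [hr])
    simp only [List.cons_append, sp, hc, if_false, ih hq]

-- relating PySem's string-level split to sp
theorem split_str (s : String) :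
    PySem.Str.split? s " " = some ((sp s.toList).map String.ofList) := by
  have h1 : PySem.Chars.split? s.toList (" " : String).toList = some (sp s.toList) := by
    show PySem.Chars.split? s.toList [' '] = some (sp s.toList)
    simp [PySem.Chars.split?, splitOn_space]
  show Option.map _ _ = _
  rw [h1]
  rfl

theorem ofList_lower (x : String) :
    String.ofList (PySem.Chars.lower x.toList) = PySem.Str.lower x := by
  rw [← PySem.Str.toList_lower, String.ofList_toList]

theorem lowerChar_ne_space (d : Char) (h : d ≠ ' ') : PySem.Chars.lowerChar d ≠ ' ' := by
  unfold PySem.Chars.lowerChar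
  split
  · rename_i hu
    simp only [PySem.Chars.isupper, Bool.and_eq_true, decide_eq_true_eq] at hu
    have h1 : 65 ≤ d.toNat := Char.le_def.1 hu.1
    have h2 : d.toNat ≤ 90 := Char.le_def.1 hu.2
    intro he
    have hv : (d.toNat + 32).isValidChar := by left; omega
    have h3 := congrArg Char.toNat he
    rw [Char.toNat_ofNat, if_pos hv] at h3
    have h4 : d.toNat + 32 = 32 := h3
    omega
  · exact h

theorem no_space_lower (l : List Char) (h : (' ' : Char) ∉ l) : (' ' : Char) ∉ PySem.Chars.lower l := by
  unfold PySem.Chars.lower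
  intro hm
  obtain ⟨d, hd, hde⟩ := List.mem_map.1 hm
  exact lowerChar_ne_space d (fun he => h (he ▸ hd)) hde

-- toList of a lowered two-word / three-word gram
theorem lower_gram2 (a b : String) :
    (PySem.Str.lower (a ++ " " ++ b)).toList
      = (PySem.Str.lower a).toList ++ ' ' :: (PySem.Str.lower b).toList := by
  rw [PySem.Str.toList_lower, PySem.Str.toList_lower, PySem.Str.toList_lower]
  show PySem.Chars.lower ((a ++ " " ++ b).toList) = _
  rw [String.toList_append, String.toList_append]
  show PySem.Chars.lower (a.toList ++ [' '] ++ b.toList) = _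
  unfold PySem.Chars.lower
  simp [PySem.Chars.lowerChar, PySem.Chars.isupper]

theorem lower_gram3 (a b c : String) :
    (PySem.Str.lower (a ++ " " ++ b ++ " " ++ c)).toList
      = (PySem.Str.lower a).toList ++ ' ' :: ((PySem.Str.lower b).toList ++ ' ' :: (PySem.Str.lower c).toList) := by
  rw [PySem.Str.toList_lower, PySem.Str.toList_lower, PySem.Str.toList_lower, PySem.Str.toList_lower]
  show PySem.Chars.lower ((a ++ " " ++ b ++ " " ++ c).toList) = _
  rw [String.toList_append, String.toList_append, String.toList_append, String.toList_append]
  show PySem.Chars.lower (a.toList ++ [' '] ++ b.toList ++ [' '] ++ c.toList) = _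
  unfold PySem.Chars.lower
  simp [PySem.Chars.lowerChar, PySem.Chars.isupper]

-- the split of a word with no space, and of lowered grams
theorem parts_lower_word (w : String) (hw : (' ' : Char) ∉ w.toList) :
    (PySem.Str.split? (PySem.Str.lower w) " ").getD [] = [PySem.Str.lower w] := by
  rw [split_str]
  rw [PySem.Str.toList_lower, sp_of_no_space _ (no_space_lower _ hw)]
  simp [← PySem.Str.toList_lower, String.ofList_toList]

theorem parts_lower_gram2 (a b : String) (ha : (' ' : Char) ∉ a.toList) (hb : (' ' : Char) ∉ b.toList) :
    (PySem.Str.split? (PySem.Str.lower (a ++ " " ++ b)) " ").getD []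
      = [PySem.Str.lower a, PySem.Str.lower b] := by
  rw [split_str]
  rw [lower_gram2, sp_append _ _ (by rw [PySem.Str.toList_lower]; exact no_space_lower _ ha),
    sp_of_no_space _ (by rw [PySem.Str.toList_lower]; exact no_space_lower _ hb)]
  simp [ofList_lower]

theorem parts_lower_gram3 (a b c : String) (ha : (' ' : Char) ∉ a.toList)
    (hb : (' ' : Char) ∉ b.toList) (hc : (' ' : Char) ∉ c.toList) :
    (PySem.Str.split? (PySem.Str.lower (a ++ " " ++ b ++ " " ++ c)) " ").getD []
      = [PySem.Str.lower a, PySem.Str.lower b, PySem.Str.lower c] := by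
  rw [split_str]
  rw [lower_gram3, sp_append _ _ (by rw [PySem.Str.toList_lower]; exact no_space_lower _ ha),
    sp_append _ _ (by rw [PySem.Str.toList_lower]; exact no_space_lower _ hb),
    sp_of_no_space _ (by rw [PySem.Str.toList_lower]; exact no_space_lower _ hc)]
  simp [ofList_lower]

-- Bool form of the per-country test
def ccCb (low : List String) (n : Nat) (country : String) : Bool :=
  let parts := (PySem.Str.split? country " ").getD []
  let k := parts.length
  decide (k ≤ 3) && (PySem.List.pyRange 0 ((n : Int) - (k : Int) + 1)).any
      (fun i => PySem.List.slice low (some i) (some (i + (k : Int))) == parts)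

theorem ccAltLoop_char (low : List String) (n : Nat) (cs : List String) :
    ccAltLoop low n cs = if cs.any (ccCb low n) = true then 1 else 0 := by
  induction cs with
  | nil => simp [ccAltLoop]
  | cons c rest ih =>
    show (if _ ∧ _ then (1:Int) else ccAltLoop low n rest) = _
    by_cases hc : ccCb low n c = true
    · rw [if_pos, if_pos]
      · simp [hc]
      · simp only [ccCb, Bool.and_eq_true, decide_eq_true_eq] at hc
        exact hc
    · rw [if_neg, ih]
      · by_cases hr : rest.any (ccCb low n) = true
        · rw [if_pos hr, if_pos (by simp [hr])]
        · rw [if_neg hr, if_neg (by simp [hc, hr])]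
      · intro hand
        exact hc (by simp only [ccCb, Bool.and_eq_true, decide_eq_true_eq]; exact hand)

-- the shared characterisation: both programs are the indicator of ccH
def ccH (ws cs : List String) : Prop :=
  (∃ k : Nat, k < ws.length ∧ PySem.Str.lower (ws.getD k "") ∈ cs)
  ∨ (∃ k : Nat, k + 1 < ws.length ∧ PySem.Str.lower (ws.getD k "" ++ " " ++ ws.getD (k+1) "") ∈ cs)
  ∨ (∃ k : Nat, k + 2 < ws.length ∧ PySem.Str.lower (ws.getD k "" ++ " " ++ ws.getD (k+1) "" ++ " " ++ ws.getD (k+2) "") ∈ cs)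

theorem c1_iff (ws cs : List String) : (ws.any (fun word => decide (PySem.Str.lower word ∈ cs)) = true)
    ↔ ∃ k : Nat, k < ws.length ∧ PySem.Str.lower (ws.getD k "") ∈ cs := by
  rw [List.any_eq_true]
  constructor
  · rintro ⟨w, hw, hc⟩
    rw [List.mem_iff_getElem] at hw
    obtain ⟨k, hk, rfl⟩ := hw
    exact ⟨k, hk, by rw [List.getD_eq_getElem ws "" hk]; exact of_decide_eq_true hc⟩
  · rintro ⟨k, hk, hc⟩
    refine ⟨ws[k], List.getElem_mem hk, ?_⟩
    rw [List.getD_eq_getElem ws "" hk] at hc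
    exact decide_eq_true hc

theorem c2_iff (ws cs : List String) : (2 ≤ ws.length ∧
      (PySem.List.pyRange 1 (ws.length : Int)).any (fun i =>
        decide (PySem.Str.lower (PySem.List.pyGetD ws (i-1) "" ++ " " ++ PySem.List.pyGetD ws i "") ∈ cs)) = true)
    ↔ ∃ k : Nat, k + 1 < ws.length ∧
        PySem.Str.lower (ws.getD k "" ++ " " ++ ws.getD (k+1) "") ∈ cs := by
  constructor
  · rintro ⟨hlen, hany⟩
    rw [List.any_eq_true] at hany
    obtain ⟨i, hi, hg⟩ := hany
    rw [PySem.List.mem_pyRange_one] at hi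
    refine ⟨(i-1).toNat, by omega, ?_⟩
    have hik : i = ((i-1).toNat : Int) + 1 := by omega
    rw [hik] at hg
    have e1 : ((i-1).toNat : Int) + 1 - 1 = (((i-1).toNat : Nat) : Int) := by ring
    have e2 : ((i-1).toNat : Int) + 1 = ((((i-1).toNat + 1 : Nat)) : Int) := by push_cast; ring
    rw [e1, e2, PySem.List.pyGetD_natCast, PySem.List.pyGetD_natCast] at hg
    exact of_decide_eq_true hg
  · rintro ⟨k, hk, hP⟩
    refine ⟨by omega, ?_⟩
    rw [List.any_eq_true]
    refine ⟨(k:Int)+1, by rw [PySem.List.mem_pyRange_one]; omega, ?_⟩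
    have e1 : (k:Int) + 1 - 1 = ((k:Nat) : Int) := by ring
    have e2 : (k:Int) + 1 = (((k+1 : Nat)) : Int) := by push_cast; ring
    rw [e1, e2, PySem.List.pyGetD_natCast, PySem.List.pyGetD_natCast]
    exact decide_eq_true hP

theorem c3_iff (ws cs : List String) : (3 ≤ ws.length ∧
      (PySem.List.pyRange 2 (ws.length : Int)).any (fun i =>
        decide (PySem.Str.lower (PySem.List.pyGetD ws (i-2) "" ++ " " ++ PySem.List.pyGetD ws (i-1) "" ++ " " ++ PySem.List.pyGetD ws i "") ∈ cs)) = true)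
    ↔ ∃ k : Nat, k + 2 < ws.length ∧
        PySem.Str.lower (ws.getD k "" ++ " " ++ ws.getD (k+1) "" ++ " " ++ ws.getD (k+2) "") ∈ cs := by
  constructor
  · rintro ⟨hlen, hany⟩
    rw [List.any_eq_true] at hany
    obtain ⟨i, hi, hg⟩ := hany
    rw [PySem.List.mem_pyRange_one] at hi
    refine ⟨(i-2).toNat, by omega, ?_⟩
    have hik : i = ((i-2).toNat : Int) + 2 := by omega
    rw [hik] at hg
    have e0 : ((i-2).toNat : Int) + 2 - 2 = (((i-2).toNat : Nat) : Int) := by ring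
    have e1 : ((i-2).toNat : Int) + 2 - 1 = ((((i-2).toNat + 1 : Nat)) : Int) := by push_cast; ring
    have e2 : ((i-2).toNat : Int) + 2 = ((((i-2).toNat + 2 : Nat)) : Int) := by push_cast; ring
    rw [e0, e1, e2, PySem.List.pyGetD_natCast, PySem.List.pyGetD_natCast, PySem.List.pyGetD_natCast] at hg
    exact of_decide_eq_true hg
  · rintro ⟨k, hk, hP⟩
    refine ⟨by omega, ?_⟩
    rw [List.any_eq_true]
    refine ⟨(k:Int)+2, by rw [PySem.List.mem_pyRange_one]; omega, ?_⟩
    have e0 : (k:Int) + 2 - 2 = ((k:Nat) : Int) := by ring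
    have e1 : (k:Int) + 2 - 1 = (((k+1 : Nat)) : Int) := by push_cast; ring
    have e2 : (k:Int) + 2 = (((k+2 : Nat)) : Int) := by push_cast; ring
    rw [e0, e1, e2, PySem.List.pyGetD_natCast, PySem.List.pyGetD_natCast, PySem.List.pyGetD_natCast]
    exact decide_eq_true hP

-- a length-k window of low as a slice, in both directions
theorem slice_window (low : List String) (j k : Nat) :
    PySem.List.slice low (some (j : Int)) (some ((j : Int) + (k : Int))) = (low.drop j).take k := by
  have : ((j : Int) + (k : Int)) = (((j + k : Nat)) : Int) := by push_cast; ring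
  rw [this, PySem.List.slice_natCast]
  congr 1
  omega

theorem take_drop1 {α : Type} (l : List α) (j : Nat) (h : j < l.length) :
    (l.drop j).take 1 = [l[j]] := by
  rw [List.drop_eq_getElem_cons h]
  rfl

theorem take_drop2 {α : Type} (l : List α) (j : Nat) (h : j + 1 < l.length) :
    (l.drop j).take 2 = [l[j], l[j+1]] := by
  rw [List.drop_eq_getElem_cons (by omega), List.drop_eq_getElem_cons h]
  rfl

theorem take_drop3 {α : Type} (l : List α) (j : Nat) (h : j + 2 < l.length) :
    (l.drop j).take 3 = [l[j], l[j+1], l[j+2]] := by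
  rw [List.drop_eq_getElem_cons (by omega), List.drop_eq_getElem_cons (by omega),
    List.drop_eq_getElem_cons h]
  rfl

theorem intercalate1 (p : List Char) : [' '].intercalate [p] = p := by
  simp [List.intercalate]

theorem intercalate2 (p q : List Char) : [' '].intercalate [p, q] = p ++ ' ' :: q := by
  simp [List.intercalate, List.intersperse]

theorem intercalate3 (p q r : List Char) :
    [' '].intercalate [p, q, r] = p ++ ' ' :: (q ++ ' ' :: r) := by
  simp [List.intercalate, List.intersperse]

-- the bridge: existence of a matching country ↔ ccH
set_option maxHeartbeats 1000000 in
theorem ccBridge (ws cs : List String) (hws : ∀ w ∈ ws, (' ' : Char) ∉ w.toList) :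
    (cs.any (ccCb (ws.map (fun w => PySem.Str.lower w)) ws.length) = true) ↔ ccH ws cs := by
  set low := ws.map (fun w => PySem.Str.lower w) with hlow
  have hlen : low.length = ws.length := by simp [hlow]
  have hget : ∀ j : Nat, (h : j < ws.length) → low[j]'(by omega) = PySem.Str.lower ws[j] := by
    intro j h
    simp [hlow]
  rw [List.any_eq_true]
  constructor
  · rintro ⟨c, hc, hb⟩
    simp only [ccCb, Bool.and_eq_true, decide_eq_true_eq, List.any_eq_true] at hb
    obtain ⟨hk3, i, hi, hsl⟩ := hb
    rw [PySem.List.mem_pyRange_one] at hi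
    rw [beq_iff_eq] at hsl
    set parts := (PySem.Str.split? c " ").getD [] with hparts
    have hsp : parts = (sp c.toList).map String.ofList := by rw [hparts, split_str]; rfl
    have hk1 : 1 ≤ parts.length := by
      rw [hsp, List.length_map]
      rcases List.exists_cons_of_ne_nil (sp_ne_nil c.toList) with ⟨p, ps, hq⟩
      rw [hq]; simp
    set k := parts.length with hk
    set j := i.toNat with hj
    have hij : i = (j : Int) := by omega
    have hjk : j + k ≤ ws.length := by omega
    rw [hij, slice_window low j k] at hsl
    have hct : c.toList = [' '].intercalate (sp c.toList) := (join_sp c.toList).symm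
    interval_cases k
    · -- k = 1
      obtain ⟨p, hp⟩ := List.length_eq_one_iff.1 (by rw [hsp] at hk; simpa using hk.symm)
      rw [take_drop1 low j (by omega), hsp, hp] at hsl
      have hpl : String.ofList p = low[j]'(by omega) := by
        have := congrArg (fun l => l.getD 0 "") hsl
        simpa using this.symm
      refine Or.inl ⟨j, by omega, ?_⟩
      have hcp : c = low[j]'(by omega) := by
        rw [← hpl]
        rw [hp, intercalate1] at hct
        rw [← @String.ofList_toList c, hct]
      rw [List.getD_eq_getElem ws "" (by omega), ← hget j (by omega), ← hcp]
      exact hc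
    · -- k = 2
      obtain ⟨p, q, hp⟩ := List.length_eq_two.1 (by rw [hsp] at hk; simpa using hk.symm)
      rw [take_drop2 low j (by omega), hsp, hp] at hsl
      have hpl : String.ofList p = low[j]'(by omega) := by
        have := congrArg (fun l => l.getD 0 "") hsl; simpa using this.symm
      have hql : String.ofList q = low[j+1]'(by omega) := by
        have := congrArg (fun l => l.getD 1 "") hsl; simpa using this.symm
      refine Or.inr (Or.inl ⟨j, by omega, ?_⟩)
      have hcp : c = PySem.Str.lower (ws[j]'(by omega) ++ " " ++ ws[j+1]'(by omega)) := by
        rw [hp, intercalate2] at hct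
        rw [← @String.ofList_toList c, hct, ← @String.ofList_toList
          (PySem.Str.lower (ws[j]'(by omega) ++ " " ++ ws[j+1]'(by omega)))]
        congr 1
        rw [lower_gram2, ← hget j (by omega), ← hget (j+1) (by omega), ← hpl, ← hql]
        simp [String.toList_ofList]
      rw [List.getD_eq_getElem ws "" (by omega), List.getD_eq_getElem ws "" (by omega), ← hcp]
      exact hc
    · -- k = 3
      obtain ⟨p, q, r, hp⟩ := List.length_eq_three.1 (by rw [hsp] at hk; simpa using hk.symm)
      rw [take_drop3 low j (by omega), hsp, hp] at hsl
      have hpl : String.ofList p = low[j]'(by omega) := by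
        have := congrArg (fun l => l.getD 0 "") hsl; simpa using this.symm
      have hql : String.ofList q = low[j+1]'(by omega) := by
        have := congrArg (fun l => l.getD 1 "") hsl; simpa using this.symm
      have hrl : String.ofList r = low[j+2]'(by omega) := by
        have := congrArg (fun l => l.getD 2 "") hsl; simpa using this.symm
      refine Or.inr (Or.inr ⟨j, by omega, ?_⟩)
      have hcp : c = PySem.Str.lower (ws[j]'(by omega) ++ " " ++ ws[j+1]'(by omega) ++ " " ++ ws[j+2]'(by omega)) := by
        rw [hp, intercalate3] at hct
        rw [← @String.ofList_toList c, hct, ← @String.ofList_toList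
          (PySem.Str.lower (ws[j]'(by omega) ++ " " ++ ws[j+1]'(by omega) ++ " " ++ ws[j+2]'(by omega)))]
        congr 1
        rw [lower_gram3, ← hget j (by omega), ← hget (j+1) (by omega), ← hget (j+2) (by omega),
          ← hpl, ← hql, ← hrl]
        simp [String.toList_ofList]
      rw [List.getD_eq_getElem ws "" (by omega), List.getD_eq_getElem ws "" (by omega),
        List.getD_eq_getElem ws "" (by omega), ← hcp]
      exact hc
  · intro H
    rcases H with ⟨j, hjn, hmem⟩ | ⟨j, hjn, hmem⟩ | ⟨j, hjn, hmem⟩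
    · refine ⟨_, hmem, ?_⟩
      rw [List.getD_eq_getElem ws "" hjn] at *
      have hparts := parts_lower_word (ws[j]'hjn) (hws _ (List.getElem_mem hjn))
      simp only [ccCb, hparts, List.length_cons, List.length_nil, Bool.and_eq_true,
        decide_eq_true_eq, List.any_eq_true]
      refine ⟨by omega, (j : Int), ?_, ?_⟩
      · rw [PySem.List.mem_pyRange_one]; omega
      · rw [slice_window low j 1, take_drop1 low j (by omega), hget j hjn, beq_iff_eq]
    · refine ⟨_, hmem, ?_⟩
      rw [List.getD_eq_getElem ws "" (by omega : j < ws.length),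
        List.getD_eq_getElem ws "" (by omega : j + 1 < ws.length)] at *
      have hparts := parts_lower_gram2 (ws[j]'(by omega)) (ws[j+1]'(by omega))
        (hws _ (List.getElem_mem (by omega))) (hws _ (List.getElem_mem (by omega)))
      simp only [ccCb, hparts, List.length_cons, List.length_nil, Bool.and_eq_true,
        decide_eq_true_eq, List.any_eq_true]
      refine ⟨by omega, (j : Int), ?_, ?_⟩
      · rw [PySem.List.mem_pyRange_one]; omega
      · rw [slice_window low j 2, take_drop2 low j (by omega),
          hget j (by omega), hget (j+1) (by omega), beq_iff_eq]
    · refine ⟨_, hmem, ?_⟩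
      rw [List.getD_eq_getElem ws "" (by omega : j < ws.length),
        List.getD_eq_getElem ws "" (by omega : j + 1 < ws.length),
        List.getD_eq_getElem ws "" (by omega : j + 2 < ws.length)] at *
      have hparts := parts_lower_gram3 (ws[j]'(by omega)) (ws[j+1]'(by omega)) (ws[j+2]'(by omega))
        (hws _ (List.getElem_mem (by omega))) (hws _ (List.getElem_mem (by omega)))
        (hws _ (List.getElem_mem (by omega)))
      simp only [ccCb, hparts, List.length_cons, List.length_nil, Bool.and_eq_true,
        decide_eq_true_eq, List.any_eq_true]
      refine ⟨by omega, (j : Int), ?_, ?_⟩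
      · rw [PySem.List.mem_pyRange_one]; omega
      · rw [slice_window low j 3, take_drop3 low j (by omega),
          hget j (by omega), hget (j+1) (by omega), hget (j+2) (by omega), beq_iff_eq]

-- ===== VERDICT (by name: the statement is the Claim_ definition above) =====
theorem contains_country_spec : Claim_equal_contains_country := by
  intro ngram cs _ _
  show contains_country ngram cs = contains_country_alt ngram cs
  unfold contains_country contains_country_alt
  set s := (PySem.List.pyGet? ngram 0).getD "" with hs
  set ws := (PySem.Str.split? s " ").getD [] with hws0
  have hlen : (ws.map (fun w => PySem.Str.lower w)).length = ws.length := by simp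
  have hws : ∀ w ∈ ws, (' ' : Char) ∉ w.toList := by
    intro w hw
    rw [hws0, split_str] at hw
    simp only [Option.getD_some] at hw
    obtain ⟨p, hp, rfl⟩ := List.mem_map.1 hw
    rw [String.toList_ofList]
    exact sp_no_space _ _ hp
  rw [ccAltLoop_char, hlen]
  by_cases H : ccH ws cs
  · rw [if_pos ((ccBridge ws cs hws).2 H)]
    rcases H with h1 | h2 | h3
    · rw [if_pos ((c1_iff ws cs).2 h1)]
    · by_cases hc1 : ws.any (fun word => decide (PySem.Str.lower word ∈ cs)) = true
      · rw [if_pos hc1]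
      · rw [if_neg (by simpa using hc1), if_pos ((c2_iff ws cs).2 h2)]
    · by_cases hc1 : ws.any (fun word => decide (PySem.Str.lower word ∈ cs)) = true
      · rw [if_pos hc1]
      · rw [if_neg (by simpa using hc1)]
        by_cases hc2 : 2 ≤ ws.length ∧ (PySem.List.pyRange 1 (ws.length : Int)).any (fun i =>
            decide (PySem.Str.lower (PySem.List.pyGetD ws (i-1) "" ++ " " ++ PySem.List.pyGetD ws i "") ∈ cs)) = true
        · rw [if_pos hc2]
        · rw [if_neg hc2, if_pos ((c3_iff ws cs).2 h3)]
  · rw [if_neg (fun ha => H ((ccBridge ws cs hws).1 ha))]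
    rw [if_neg, if_neg, if_neg]
    · exact fun hc => H (Or.inr (Or.inr ((c3_iff ws cs).1 hc)))
    · exact fun hc => H (Or.inr (Or.inl ((c2_iff ws cs).1 hc)))
    · intro hc
      exact H (Or.inl ((c1_iff ws cs).1 (by simpa using hc)))
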